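/-
  WHAT EVERY UNIT STATEMENT OF EVERY PROGRAM SHARES (the statements themselves: <Prog>/Spec/Units/*.lean and ProgX/Base/Units/*.lean,
  generated by farm/mkstatement.py; the `Spec` of each function: ProgX/Spec/<Group>.lean for the runtime, libc, libm, and
  <Prog>/Spec/*.lean for the program). Everything here takes the program's `T : Text` (ProgX/Text.lean) as its first argument.

      WayInv T               THE INVARIANT OF THE WAY: the machine is not at `__asan_report`, and RIP is inside the text window
                             (`ProgX.StaysInCode`, ProgX/Statement.lean, is about exactly this invariant: `wayInv_iff`)
      CodeOK T u₀ m          "the image's text is unchanged": `m` agrees with the memory of the REFERENCE STATE `u₀` on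
                             `[T.lo, T.hi)`. `u₀` is a variable of every statement (in the end: the start state), and the
                             bytes of the function a unit is about are a hypothesis about `u₀` (`HasCodeNat L u₀ entry code.nat size`).
                             `CodeOK T u₀` is the `codeOK` premise of every `SmallCheck`, and it is the walker's own `w_eq` hypothesis
      conv T u₀              THE CALLING CONVENTION of the program (`User.Conv`): code = the text as it is in `u₀` (`Code.ofMem`:
                             `(conv T u₀).code.In m ↔ CodeOK T u₀ m`), stack region `[700000H, 800000H)`, invariant of every function
                             boundary `abiInv` (DF = 0, the SSE exception masks set)
      LiveIn others frames a n      `Live(a, n)`: the `n` bytes at `a` lie inside ONE live object; `LiveIn.where_`: where such a range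
                             is (data space, off the text, off the stack below `top`), as one arithmetic fact
      ShadowPre T others frames u   the shadow clause of a contract's pre: `ShadowInv others frames (rsp + 8) u.mem` (`.inv`) and no object of
                             `others` in the image's text (`.offText`). The post of an UNPROTECTED function that calls no shadow writer
                             says `ShadowUntouched u.mem v.mem`, from which the layer follows again (`ShadowPre.post`)
      check_small / check_small_other / LiveIn.accSmall
                             HOW A `check_<addr>` GOAL IS CLOSED: the bytes lie inside a live object of the invariant at the
                             function's entry, and no store since has touched the shadow (`v_untouched`)
      stack_has, byte_of_part32, readLE_stored_byte32, toNat_ofBV32, toNat_part32      small facts every walk meets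
      v_entry he             the first line of a unit's proof: `AtEntry`'s fields as hypotheses in the form the walker and `u_omega`
                             read (`he_room` … as numbers, `he_eq` the code span, `he_stack` the whole stack's `Lay.Has`, `he_df he_mx he_sse`)
      v_side                 the side tactic of `u_walk` (`u_omega` after `vspec` and the convention are unfolded)
      v_inv, v_returned, v_untouched, v_after_call
                             the `inv` field of a callee's `AtEntry` / of `Returned`; the function's own `Returned`; "no store
                             went to the shadow"; the first line after a contract call

  A STATEMENT (generated: farm/mkstatement.py) quantifies over `Lay : Layout` with `Lay.hi = 0x1000000` (the layout of the start state:
  user region [100000H, 1000000H); a VARIABLE, so that `u_omega` reads `Lay.Has`), `μ` with `UserX.MicroOK μ`, the reference state `u₀`,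
  `HasCodeNat Lay u₀ L.f.entry code_f.nat L.f.size`, the callees' contracts, and concludes
  `∀ ghosts, Calls Lay μ (WayInv T) (conv T u₀) L.f.entry (f.spec T ghosts)`. Every code address is a label of a generated Labels file.

  `T` IS A CLOSED TERM IN EVERY PROOF (`ProgX.Base.T`, `Vorbis.text`): its fields evaluate, so the walker's span (`whnfD`), the way
  invariant at a literal RIP (`decide`) and `exact` against a numeral all see the numbers. `u_omega` does NOT unfold it: the one
  fact a proof takes from a generic lemma and feeds to `omega` (`LiveIn.where_`) is stated with the numeral the program declares for
  its record (`Text.HiIs`, ProgX/Text.lean).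
-/
import ProgX.Spec.Attr
import ProgX.Text
import ProgX.Statement
import Asan.Runtime
import Asan.Check
import Asan.CheckWalk
import UserX.SseStep
import UserX.Loop
import UserX.Call
import UserX.CallAt
import UserX.FrameTac
namespace ProgX
open X86 X86.User Asan

/-! ### The invariant of the way, the code, the convention -/

/-- **The invariant of the way** of every contract of a program: the machine is not at `__asan_report`, and RIP is inside the
text window of the image. `u_walk` discharges it at every step by evaluation (RIP is a numeral there, `T` a closed term). -/
abbrev WayInv (T : Text) : State → Prop :=
  fun v => v.rip ≠ T.report ∧ T.lo ≤ v.rip.toNat ∧ v.rip.toNat < T.hi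

/-- **An image is linked for the text record `T`**: the window starts at 100000H (where every image is loaded), ends at the
image's `textEnd`, and the report address is the image's. What makes `WayInv T` the invariant of `StaysInCode im`. -/
structure Text.Of (T : Text) (im : Image) : Prop where
  lo : T.lo = 0x100000
  hi : T.hi = im.textEnd
  report : T.report = im.report

/-- `WayInv T` is the invariant `ProgX.StaysInCode.of_reachVia` asks for, for an image linked for `T`. -/
theorem wayInv_iff {T : Text} {im : Image} (h : T.Of im) (v : State) :
    WayInv T v ↔ (v.rip ≠ im.report ∧ InText im v.rip) := by
  unfold InText
  rw [← h.report, ← h.hi, ← h.lo]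

/-- **The image's text is unchanged**: the memory `m` agrees with the memory of the reference state `u₀` on the text. -/
abbrev CodeOK (T : Text) (u₀ : State) : Mem → Prop :=
  fun m => Mem.EqOn T.lo T.hi u₀.mem m

/-- **The calling convention of the program**: the code is the text as it is in the reference state `u₀`, the stack region is
`[700000H, 800000H)`, the invariant of every function boundary is the ABI's (DF = 0, SSE exceptions masked). -/
def conv (T : Text) (u₀ : State) : Conv where
  code := Code.ofMem u₀.mem T.lo (T.hi - T.lo)
  stackLo := 0x700000
  stackHi := 0x800000
  inv := abiInv

@[simp] theorem conv_stackLo (T : Text) (u₀ : State) : (conv T u₀).stackLo = 0x700000 := id rfl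
@[simp] theorem conv_stackHi (T : Text) (u₀ : State) : (conv T u₀).stackHi = 0x800000 := id rfl
@[simp] theorem conv_inv (T : Text) (u₀ : State) : (conv T u₀).inv = abiInv := id rfl

/-- The text window's two ends, as one side condition of `Code.ofMem`. -/
theorem Text.span_lt (T : Text) : T.lo + (T.hi - T.lo) < 2 ^ 64 := by
  have h1 := T.lo_le
  have h2 := T.hi_le
  omega

/-- The length form of the window is the window. -/
theorem Text.lo_add_len (T : Text) : T.lo + (T.hi - T.lo) = T.hi := by
  have h1 := T.lo_le
  omega

/-- The convention's code is in `m` exactly when the text of `m` is that of the reference state. -/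
theorem conv_code_iff (T : Text) (u₀ : State) (m : Mem) : (conv T u₀).code.In m ↔ CodeOK T u₀ m := by
  have h := Code.ofMem_in_iff (m₀ := u₀.mem) (m := m) (lo := T.lo) (len := T.hi - T.lo) T.span_lt
  rw [T.lo_add_len] at h
  exact h

/-- The `code` field of a callee's `AtEntry` / of the function's own `Returned`, from the walker's `w_eq`. -/
theorem conv_code_in {T : Text} {u₀ : State} {m : Mem} (h : Mem.EqOn T.lo T.hi u₀.mem m) : (conv T u₀).code.In m :=
  (conv_code_iff T u₀ m).mpr h

/-- The walker's span fact at the function's entry, from `AtEntry.code`. -/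
theorem conv_code_eqOn {T : Text} {u₀ : State} {m : Mem} (h : (conv T u₀).code.In m) : Mem.EqOn T.lo T.hi u₀.mem m :=
  (conv_code_iff T u₀ m).mp h

/-- The ABI invariant gives the stepper's `SseOK`. -/
theorem sseOK_of_abiInv {u : State} (h : abiInv u) : SseOK u :=
  ⟨h.2⟩

/-- … and back: DF and the MXCSR masks of a state whose flags' DF and MXCSR masks are known. -/
theorem abiInv_of {u : State} (hdf : u.flags .df = false) (hmx : u.mxcsr &&& 0x1F80 = 0x1F80) : abiInv u :=
  ⟨hdf, hmx⟩

/-! ### Live objects; the shadow clause of an unprotected function -/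

/-- **`Live(a, n)`**: the `n` bytes at `a` lie inside ONE live object — a stack object of an active protected frame, or one of
`others` (globals, input, output, heap or arena blocks). -/
def LiveIn (others : List Obj) (frames : List (Nat × FrameLayout)) (a n : Nat) : Prop :=
  ∃ o, o ∈ stackObjs frames ++ others ∧ o.base ≤ a ∧ a + n ≤ o.base + o.size

/-- **The shadow clause of a contract's precondition**: the shadow layer holds at the entry state, with the clean stack ending
at the caller's stack pointer (`rsp + 8`: the slot of the return address is part of the clean region); and no live object lies
in the image's text window (the live objects are the registered globals — `.rodata`, `.data`, `.bss`, all above the text —, the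
input, the output, heap or arena blocks and stack objects), so that a checked store never touches the code. -/
structure ShadowPre (T : Text) (others : List Obj) (frames : List (Nat × FrameLayout)) (u : State) : Prop where
  inv : ShadowInv others frames ((u.reg .rsp).toNat + 8) u.mem
  offText : ∀ o, o ∈ others → T.hi ≤ o.base

namespace LiveIn
variable {T : Text} {others : List Obj} {frames : List (Nat × FrameLayout)} {top a n : Nat} {mem : Mem}

/-- A sub-range of a live range. -/
theorem sub (h : LiveIn others frames a n) (b k : Nat) (h1 : a ≤ b) (h2 : b + k ≤ a + n) : LiveIn others frames b k := by
  obtain ⟨o, ho, k1, k2⟩ := h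
  exact ⟨o, ho, by omega, by omega⟩

/-- **The list of the other live objects grew (or was reordered)**: a live range stays live (what a client needs after `malloc`).
(The general form, over both lists: `LiveIn.mono`, ProgX/Spec/Common.lean.) -/
theorem mono_others {others' : List Obj} (h : LiveIn others frames a n) (hsub : ∀ o, o ∈ others → o ∈ others') :
    LiveIn others' frames a n := by
  obtain ⟨o, ho, k1, k2⟩ := h
  refine ⟨o, ?_, k1, k2⟩
  rcases List.mem_append.mp ho with hs | hoth
  · exact List.mem_append_left _ hs
  · exact List.mem_append_right _ (hsub o hoth)

/-- A range inside an object of `others` is live. -/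
theorem of_other {o : Obj} (ho : o ∈ others) (h1 : o.base ≤ a) (h2 : a + n ≤ o.base + o.size) : LiveIn others frames a n :=
  ⟨o, List.mem_append_right _ ho, h1, h2⟩

/-- A live range lies in the data space `[100000H, C00000H)`. -/
theorem inside (h : LiveIn others frames a n) (hinv : ShadowInv others frames top mem) (hn : 0 < n) :
    0x100000 ≤ a ∧ a + n ≤ 0xC00000 := by
  obtain ⟨o, ho, k1, k2⟩ := h
  have := hinv.shadow.inside ho (by omega)
  omega

/-- **A live range does not meet the stack below `top`** (the function's own frame and everything it pushes): a stack object
lies in an active frame, at or above `top`; every other object is off the stack region. -/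
theorem above (h : LiveIn others frames a n) (hinv : ShadowInv others frames top mem) :
    top ≤ a ∨ a + n ≤ 0x700000 ∨ 0x800000 ≤ a := by
  obtain ⟨o, ho, k1, k2⟩ := h
  rcases List.mem_append.mp ho with hs | hoth
  · obtain ⟨bF, hbF, g1, g2⟩ := ShadowInv.stackObj_gran hinv.stack hs
    obtain ⟨_, a8, atop, _, _⟩ := hinv.stack.active bF hbF
    have : o.gLo = o.base / 8 := rfl
    left
    omega
  · have := hinv.off o hoth
    unfold OffStack at this
    omega

/-- **A live range does not meet the image's text window** (which ends below the stack region: `Text.hi_le`). -/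
theorem offText (h : LiveIn others frames a n) (hinv : ShadowInv others frames top mem)
    (hoff : ∀ o, o ∈ others → T.hi ≤ o.base) : T.hi ≤ a := by
  have hT := T.hi_le
  obtain ⟨o, ho, k1, k2⟩ := h
  rcases List.mem_append.mp ho with hs | hoth
  · obtain ⟨bF, hbF, g1, g2⟩ := ShadowInv.stackObj_gran hinv.stack hs
    obtain ⟨_, a8, atop, _, _⟩ := hinv.stack.active bF hbF
    have hlo := hinv.stack.lo
    have : o.gLo = o.base / 8 := rfl
    omega
  · have := hoff o hoth
    omega

/-- **Everything a walk needs to know about where a live range is**, as one arithmetic fact for `u_omega`: inside the data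
space, off the image's text, off the stack below `top`. (`n = 0`: nothing is known, nothing is accessed.) The end of the text
is stated as the NUMERAL the program declared for its record (`Text.HiIs T hi`: `0x119d40 ≤ a` for `Vorbis.text`), so that
`omega` reads the fact as it is; for a record without a declaration it is `T.hi ≤ a`. -/
theorem where_ {hi : Nat} [hT : T.HiIs hi] (h : LiveIn others frames a n) (hinv : ShadowInv others frames top mem)
    (hoff : ∀ o, o ∈ others → T.hi ≤ o.base) (hn : 0 < n) :
    hi ≤ a ∧ a + n ≤ 0xC00000 ∧ (top ≤ a ∨ a + n ≤ 0x700000 ∨ 0x800000 ≤ a) := by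
  have h1 := h.inside hinv hn
  have h2 := h.above hinv
  have h3 : T.hi ≤ a := h.offText hinv hoff
  have h4 : T.hi = hi := hT.eq
  omega

/-- The small check of bytes inside a live range passes, in any memory whose shadow is that of the invariant's. -/
theorem accSmall (h : LiveIn others frames a n) (hinv : ShadowInv others frames top mem) {mem' : Mem}
    (hun : ShadowUntouched mem mem') (b : Word) (k : Nat) (hk : 1 ≤ k) (h1 : a ≤ b.toNat) (h2 : b.toNat + k ≤ a + n) :
    AccSmall k mem' b := by
  obtain ⟨o, ho, k1, k2⟩ := h
  have hinv' := hinv.untouched hun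
  exact ⟨hinv'.sealed, Obj.accSmall_of_obj (hinv'.shadow.obj ho) (by omega) (by omega) hk⟩

end LiveIn

/-- **A `check_<addr>` goal, K = 1, 2, 4, 8**: the `k` bytes at `b` lie inside the live object `o` of the shadow invariant
`hinv` (of the function's entry memory `mem`), and the memory at the check site has the same shadow (`hun`: no store of the
function went to the shadow — `by u_eqon`). -/
theorem check_small {others : List Obj} {frames : List (Nat × FrameLayout)} {top : Nat} {mem mem' : Mem}
    (hinv : ShadowInv others frames top mem) (hun : ShadowUntouched mem mem') {o : Obj}
    (ho : o ∈ stackObjs frames ++ others) {b : Word} {k : Nat} (hk : 1 ≤ k) (h1 : o.base ≤ b.toNat)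
    (h2 : b.toNat + k ≤ o.base + o.size) : AccSmall k mem' b := by
  have hinv' := hinv.untouched hun
  exact ⟨hinv'.sealed, Obj.accSmall_of_obj (hinv'.shadow.obj ho) h1 h2 hk⟩

/-- The same for an object of `others` (a global, the input, the output, a heap or arena block). -/
theorem check_small_other {others : List Obj} {frames : List (Nat × FrameLayout)} {top : Nat} {mem mem' : Mem}
    (hinv : ShadowInv others frames top mem) (hun : ShadowUntouched mem mem') {o : Obj} (ho : o ∈ others) {b : Word} {k : Nat}
    (hk : 1 ≤ k) (h1 : o.base ≤ b.toNat) (h2 : b.toNat + k ≤ o.base + o.size) : AccSmall k mem' b :=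
  check_small hinv hun (List.mem_append_right _ ho) hk h1 h2

/-- **The shadow clause of the postcondition of an unprotected function** (`ShadowUntouched`) gives the layer back at the
returned state: same objects, same frames, the clean stack ends at the caller's stack pointer again. -/
theorem ShadowPre.post {T : Text} {others : List Obj} {frames : List (Nat × FrameLayout)} {u v : State}
    (h : ShadowPre T others frames u) (hun : ShadowUntouched u.mem v.mem) (hrsp : v.reg .rsp = u.reg .rsp + 8) :
    ShadowInv others frames (v.reg .rsp).toNat v.mem := by
  have hhi := h.inv.stack.hi
  have e : (v.reg .rsp).toNat = (u.reg .rsp).toNat + 8 := by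
    rw [hrsp]
    exact toNat_add_ofNat (u.reg .rsp) 8 (by omega)
  rw [e]
  exact ShadowInv.untouched h.inv hun

/-- The stack pointer of a state with the shadow clause is a stack address: `700000H ≤ rsp + 8 ≤ 800000H`, 8-aligned. -/
theorem ShadowPre.rsp {T : Text} {others : List Obj} {frames : List (Nat × FrameLayout)} {u : State}
    (h : ShadowPre T others frames u) :
    0x700000 ≤ (u.reg .rsp).toNat + 8 ∧ (u.reg .rsp).toNat + 8 ≤ 0x800000 ∧ ((u.reg .rsp).toNat + 8) % 8 = 0 :=
  ⟨h.inv.stack.lo, h.inv.stack.hi, h.inv.stack.aligned⟩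

/-- **The shadow clause at a callee's entry, from the caller's own** (the `pre_<addr>` goal of a call of an unprotected function
by an unprotected function): the callee is entered with a lower stack pointer — still 8-aligned and inside the stack region —
and no store of the caller so far went to the shadow (`by v_untouched`). -/
theorem ShadowPre.callee {T : Text} {others : List Obj} {frames : List (Nat × FrameLayout)} {u v : State}
    (h : ShadowPre T others frames u) (hun : ShadowUntouched u.mem v.mem)
    (hle : (v.reg .rsp).toNat ≤ (u.reg .rsp).toNat) (h8 : (v.reg .rsp).toNat % 8 = 0)
    (hlo : 0x700000 ≤ (v.reg .rsp).toNat + 8) : ShadowPre T others frames v :=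
  ⟨(h.inv.untouched hun).lower (by omega) (by omega) hlo, h.offText⟩

/-- The byte a `mov [m8], r8` stores from the low byte of a 32-bit register value: the register's value modulo 256. -/
theorem byte_of_part32 (x : Word) : (BitVec.setWidth 8 (Word.part .w32 x)).toNat = x.toNat % 256 := by
  unfold Word.part
  simp only [Width.bits, BitVec.toNat_setWidth, UInt64.toNat_toBitVec]
  omega

/-- Reading back the byte that `mov [m8], r8` has just stored from a 32-bit register value. -/
theorem readLE_stored_byte32 (M : Mem) (a x : Word) :
    (M.writeLE a 1 (BitVec.setWidth 8 (Word.part .w32 x)).toNat).readLE a 1 = x.toNat % 256 := by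
  rw [Mem.readLE_writeLE_same _ _ _ _ (by decide), byte_of_part32, Nat.pow_one, Nat.mod_mod]

/-- The value of a 32-bit result zero-extended into a register (`mov eax, …` writes rax). -/
theorem toNat_ofBV32 (x : BitVec 32) : (Word.ofBV x).toNat = x.toNat := by
  unfold Word.ofBV
  simp only [UInt64.toNat_ofBitVec, BitVec.toNat_setWidth]
  omega

/-- The low half of a register, as a number. -/
theorem toNat_part32 (r : Word) : (Word.part .w32 r).toNat = r.toNat % 2 ^ 32 := by
  unfold Word.part
  simp only [Width.bits, BitVec.toNat_setWidth, UInt64.toNat_toBitVec]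

/-! ### The layout of the proof -/

/-- **The function's stack is inside the user region**: the `k` bytes below the return address that the contract allows
(`AtEntry.room`: `700000H + k ≤ rsp`) and the slot of the return address (`AtEntry.top`: `rsp + 8 ≤ 800000H`). One range fact
for the whole frame: the walker finds every slot's `Lay.Has` in it, and reads a slot through the stores to the other slots. -/
theorem stack_has {Lay : Layout} (hLay : Lay.hi = 0x1000000) {sp : Word} {k : Nat} (h1 : 0x700000 + k ≤ sp.toNat)
    (h2 : sp.toNat + 8 ≤ 0x800000) : Lay.Has (sp - UInt64.ofNat k) (k + 8) := by
  have hk : k < 2 ^ 64 := by omega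
  have e : (sp - UInt64.ofNat k).toNat = sp.toNat - k := by
    have hle : (UInt64.ofNat k) ≤ sp := by
      rw [UInt64.le_iff_toNat_le, UInt64.toNat_ofNat', Nat.mod_eq_of_lt hk]
      omega
    rw [UInt64.toNat_sub_of_le _ _ hle, UInt64.toNat_ofNat', Nat.mod_eq_of_lt hk]
  unfold Layout.Has Layout.lo
  rw [e, hLay]
  omega

/-- The user region of the start layout: `[100000H, 1000000H)` — every `L.Has a n` of a proof is arithmetic against these. -/
theorem startLayout_lo (c : Nat) (hc : c = 0 ∨ c = 3) : (startLayout c hc).lo = 0x100000 := by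
  unfold startLayout Layout.lo
  rfl

end ProgX

/-! ### The first and the last line of a unit's proof -/

/-- `v_side`: the side tactic of `u_walk` — `u_omega`, after the program's convention (`conv`: stack region) has been unfolded
in the goal and the frame sizes of the contracts (`vspec`) are numerals. -/
macro "v_side" : tactic => `(tactic| first
  | u_omega
  | (simp only [vspec, ProgX.conv_stackLo, ProgX.conv_stackHi, ProgX.conv_inv] <;> u_omega))

/-- `v_entry he`: opens `he : AtEntry (ProgX.conv T u₀) entry frame ret u` (as `u_entry`), then restates the fields the way the
walker and `u_omega` read them: `he_room`, `he_top` as numbers (the convention's stack region and the contract's frame size,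
`vspec`, unfolded), `he_eq : Mem.EqOn T.lo T.hi u₀.mem u.mem` (the code span: what `u_walk … span [T.lo, T.hi]` looks for),
`he_df`, `he_mx` (the two halves of `abiInv`) and `he_sse : SseOK u` (what the SSE steps look for),
`he_stack : Lay.Has (u.reg .rsp - frame) (frame + 8)` (the function's whole stack inside the user region, from
`Lay.hi = 1000000H` in the context). The names are made from the hypothesis's name. -/
elab "v_entry " h:ident : tactic => do
  let base := h.getId
  let field (suffix : String) : Lean.Ident := Lean.mkIdent (base.appendAfter suffix)
  let room := field "_room"
  let top := field "_top"
  let code := field "_code"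
  let inv := field "_inv"
  let eq := field "_eq"
  let df := field "_df"
  let mx := field "_mx"
  let sse := field "_sse"
  let stack := field "_stack"
  Lean.Elab.Tactic.evalTactic (← `(tactic| (
    u_entry $h
    simp only [vspec, ProgX.conv_stackLo, ProgX.conv_stackHi] at $room:ident $top:ident
    have $stack:ident := ProgX.stack_has (by assumption) $room $top
    try simp only [UInt64.reduceOfNat, Nat.reduceAdd, UInt64.sub_zero] at $stack:ident
    have $eq:ident := ProgX.conv_code_eqOn $code
    have $df:ident := (show X86.User.abiInv _ from $inv).1
    have $mx:ident := (show X86.User.abiInv _ from $inv).2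
    have $sse:ident := ProgX.sseOK_of_abiInv $inv)))

/-- `v_inv`: the goal `(ProgX.conv T u₀).inv s` (= `abiInv s`: DF = 0 and the MXCSR masks) at a state the walker describes by
`w_flags : s.flags = (… .setStatus …)` and `w_mxcsr : s.mxcsr = …`: DF is not a status flag (`X86.User.df_setStatus`), and the
facts about the state below (`he_df`, `he_mx` of `v_entry`; after a loop: what the invariant says of the head's DF; after an SSE
instruction: `hmx_<addr>`) are found by `with_reducible assumption` (instant; a bare `assumption` costs 4 – 12 s per stack-slot
hypothesis in the context) and, only if that fails, by `assumption` as before. -/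
macro "v_inv" : tactic => `(tactic| (
  show X86.User.abiInv _
  refine ProgX.abiInv_of ?_ ?_
  · first
      | with_reducible assumption
      | (rw [‹(_ : X86.User.State).flags = _›]
         try simp only [X86.User.df_setStatus]
         with_reducible assumption)
      | assumption
      | (rw [‹(_ : X86.User.State).flags = _›]
         try simp only [X86.User.df_setStatus]
         assumption)
  · first
      | with_reducible assumption
      | (rw [‹(_ : X86.User.State).mxcsr = _›]
         with_reducible assumption)
      | assumption
      | (rw [‹(_ : X86.User.State).mxcsr = _›]
         assumption)))

/-- `v_returned`: the goal `Returned (ProgX.conv T u₀) spec u ret s` at the state after the function's `ret`, from the walker's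
hypotheses (`w_rip`, `w_rsp`, `w_kept` + the restored registers, `w_mem`, `w_eq`, `w_flags`, `w_mxcsr`): `rip`, `rsp`, `saved`
(`u_saved`), `same` (`u_same` against the contract's footprint: `vspec` unfolds its frame size and windows), `code`
(`ProgX.conv_code_in w_eq`), `inv` (`v_inv`) are tried; a field that does not close is rotated behind the post: the goals
left are the POST FIRST, then the fields that did not close, in order. (Anonymous holes: a named hole `?inv` is already a goal
of the walker, and a named hole cannot be used twice in a proof — one `v_returned` per `ret` path.) -/
macro "v_returned" : tactic => `(tactic| (
  refine X86.User.Returned.mk ?_ ?_ ?_ ?_ ?_ ?_ ?_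
  first | focus (with_reducible assumption) | rotate_left
  first | focus (first | (with_reducible assumption) | u_rsp_popped) | rotate_left
  first | focus u_saved | rotate_left
  first | focus (simp only [X86.User.Spec.footprint, vspec]; u_same) | rotate_left
  first | focus (exact ProgX.conv_code_in ‹_›) | rotate_left
  first | focus v_inv | rotate_left))

/-- `v_untouched`: the goal `ShadowUntouched u.mem s.mem` (no store went to the shadow region) for `s.mem` the walker's nest of
stores (`w_mem`), possibly over a loop head's or a callee's memory known by `Mem.SameExcept ws u.mem _`: one disjointness side
condition per store and per window, by `u_omega` (the stack is below 800000H, a live range below C00000H). -/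
macro "v_untouched" : tactic => `(tactic| (
  unfold Asan.ShadowUntouched
  u_memnorm
  u_eqon))

set_option hygiene false in
/-- `v_after_call w_rsp_<addr> w_mem_<addr>`: the first line after a call that `u_walk` applied a contract to. The walk stopped at
the returned state with `w_same`, `w_code`, `w_inv`, `w_post`; this restates them the way the next `u_walk` and the frame tactics
read them: `w_eq` (the code span, from `w_code`), `w_df`, `w_mx`, `w_sse` (the two halves of `abiInv` and `SseOK`, from `w_inv`),
and `w_same` with the callee's footprint as numbers over the caller's entry state (the contract's frame size and windows: `vspec`;
the callee's stack pointer: `w_rsp_<addr>`; the memory at the callee's entry: `w_mem_<addr>`). -/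
macro "v_after_call " hrsp:ident hmem:ident : tactic => `(tactic| (
  have w_eq := ProgX.conv_code_eqOn w_code
  have w_df := (show X86.User.abiInv _ from w_inv).1
  have w_mx := (show X86.User.abiInv _ from w_inv).2
  have w_sse := ProgX.sseOK_of_abiInv w_inv
  simp only [X86.User.Spec.footprint, vspec, $hrsp:ident] at w_same
  rw [$hmem:ident] at w_same))
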